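-- pv_equiv track=rewrite | github.com/kalengul/graph_model_midicine | semantic_graph/full_pipeline/mark_BIO_spacy.py | bio_tagging
-- ===== SOURCE A (Python) =====
-- def bio_tagging(sequence):
--
--     saved_tags = []
--     converted_tags = sequence[:]  # Копия исходного списка для преобразований
--
--     for i, tag in enumerate(sequence):
--         if tag in {"O", "mechanism"}:
--             # Удаление сохраненных тегов
--             saved_tags.clear()
--         elif tag == "side_e":
--             # Преобразование всех сохраненных тегов в side_e
--             for idx, saved_tag in saved_tags:
--                 converted_tags[idx] = "side_e"
--             saved_tags.clear()  # Очищаем сохраненные теги после преобразования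
--         elif tag == "abbr" and saved_tags and saved_tags[-1][1] in {"side_e"}:
--             # Преобразуем abbr в side_e, если предыдущий side_e
--             converted_tags[i] = "side_e"
--         else:
--             # Сохраняем текущий тег и его индекс
--             saved_tags.append((i, tag))
--
--     bio_sequence = []
--     previous_label = None
--
--     for i, label in enumerate(converted_tags):
--         if label == 'O':
--             bio_sequence.append('O')
--             previous_label = None
--         elif label != previous_label:
--             bio_sequence.append(f'B-{label}')
--             previous_label = label
--         else:
--             bio_sequence.append(f'I-{label}')
--
--     return bio_sequence
-- ===== SOURCE B (Python) =====
-- def bio_tagging(sequence):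
--     # Pass 1: right-to-left scan with a single boolean flag instead of a
--     # saved-(index, tag) list that gets flushed on each 'side_e'.
--     converted = list(sequence)
--     boundary_is_side_e = False
--     for i in range(len(sequence) - 1, -1, -1):
--         tag = sequence[i]
--         if tag in ("O", "mechanism"):
--             boundary_is_side_e = False
--         elif tag == "side_e":
--             boundary_is_side_e = True
--         elif boundary_is_side_e:
--             converted[i] = "side_e"
--     # Pass 2: stateless pairwise BIO labelling (each label only looks at its
--     # left neighbour) instead of a previous_label accumulator.
--     prevs = [None] + converted[:-1]
--     return ["O" if lab == "O" else ("I-" + lab if prev == lab else "B-" + lab)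
--             for lab, prev in zip(converted, prevs)]
-- ===== Notes on version B (the rewrite author's own statement) =====
-- stated objective: simpler
-- what changed: The forward pass that accumulates a saved-(index,tag) list and flushes it in place on each 'side_e' is replaced by a single right-to-left scan with one boolean flag, and the stateful previous_label BIO accumulator is replaced by a stateless pairwise zip of each label with its left neighbour.
import Mathlib
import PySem

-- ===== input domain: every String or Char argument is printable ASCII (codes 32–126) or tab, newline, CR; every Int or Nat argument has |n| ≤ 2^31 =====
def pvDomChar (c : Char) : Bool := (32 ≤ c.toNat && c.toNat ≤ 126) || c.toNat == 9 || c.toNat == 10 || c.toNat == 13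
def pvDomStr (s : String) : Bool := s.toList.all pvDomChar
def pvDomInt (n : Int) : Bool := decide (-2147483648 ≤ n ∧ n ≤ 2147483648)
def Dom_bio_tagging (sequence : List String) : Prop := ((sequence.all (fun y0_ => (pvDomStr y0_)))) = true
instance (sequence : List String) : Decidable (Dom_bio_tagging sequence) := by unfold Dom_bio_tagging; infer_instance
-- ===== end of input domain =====

-- B replaces A's forward saved-index list (flushed in place on each 'side_e') by a single
-- right-to-left boolean-flag pass, and the stateful BIO accumulator by a pairwise zip; simpler, not faster.

-- ===== PORT A =====
-- enumerate(sequence): indices are always in range, so Nat indices are exact here.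
def pvEnumFrom (k : Nat) : List String → List (Nat × String)
  | [] => []
  | t :: r => (k, t) :: pvEnumFrom (k + 1) r

-- one iteration of A's first loop; converted_tags[idx] = "side_e" is List.set (idx always in range)
def pvStepA (st : List (Nat × String) × List String) (p : Nat × String) :
    List (Nat × String) × List String :=
  if p.2 = "O" ∨ p.2 = "mechanism" then
    ([], st.2)
  else if p.2 = "side_e" then
    ([], st.1.foldl (fun c q => c.set q.1 "side_e") st.2)
  else if p.2 = "abbr" ∧ st.1.getLast?.any (fun q => q.2 == "side_e") = true then
    (st.1, st.2.set p.1 "side_e")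
  else
    (st.1 ++ [(p.1, p.2)], st.2)

-- one iteration of A's second loop (the enumerate index is unused by A's code, so we fold over the labels)
def pvStepBio (st : List String × Option String) (label : String) : List String × Option String :=
  if label = "O" then (st.1 ++ ["O"], none)
  else if some label ≠ st.2 then (st.1 ++ ["B-" ++ label], some label)
  else (st.1 ++ ["I-" ++ label], st.2)

def bio_tagging (sequence : List String) : List String :=
  let converted := ((pvEnumFrom 0 sequence).foldl pvStepA ([], sequence)).2
  (converted.foldl pvStepBio ([], none)).1

-- ===== PORT B =====
-- Source B's reverse index loop, as structural recursion from the right: returns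
-- (converted suffix, flag handed to the element on the left)
def pvConvertB : List String → List String × Bool
  | [] => ([], false)
  | t :: rest =>
    let s := pvConvertB rest
    if t = "O" ∨ t = "mechanism" then (t :: s.1, false)
    else if t = "side_e" then (t :: s.1, true)
    else if s.2 then ("side_e" :: s.1, s.2)
    else (t :: s.1, s.2)

def bio_tagging_alt (sequence : List String) : List String :=
  let converted := (pvConvertB sequence).1
  let prevs : List (Option String) := none :: (converted.dropLast.map some)
  (converted.zip prevs).map (fun p =>
    if p.1 = "O" then "O"
    else if p.2 = some p.1 then "I-" ++ p.1
    else "B-" ++ p.1)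

-- ===== PRECONDITION & SPEC =====
def Spec_bio_tagging (sequence : List String) (out : List String) : Prop := out = bio_tagging_alt sequence
instance (sequence : List String) (out : List String) : Decidable (Spec_bio_tagging sequence out) := by unfold Spec_bio_tagging; infer_instance

-- ===== CLAIM (what is proved, stated in full; the proofs are below) =====
def Claim_equal_bio_tagging : Prop := ∀ (sequence : List String), Dom_bio_tagging sequence → Spec_bio_tagging sequence (bio_tagging sequence)

-- ===== LEMMAS AND PROOFS =====

-- positions of c from index k on, rewritten to "side_e" exactly where A's flush would write
def pvApply : List String → Nat → List String → List String
  | [], _, c => c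
  | t :: r, k, c =>
    if t = "O" ∨ t = "mechanism" ∨ t = "side_e" then pvApply r (k + 1) c
    else if (pvConvertB r).2 then pvApply r (k + 1) (c.set k "side_e")
    else pvApply r (k + 1) c

lemma pvFoldA_eq_apply (l : List String) : ∀ (k : Nat) (saved : List (Nat × String)) (conv : List String),
    (∀ p ∈ saved, p.2 ≠ "side_e") →
    (List.foldl pvStepA (saved, conv) (pvEnumFrom k l)).2 =
      pvApply l k (if (pvConvertB l).2 then saved.foldl (fun c q => c.set q.1 "side_e") conv else conv) := by
  induction l with
  | nil => intro k saved conv _; simp [pvEnumFrom, pvConvertB, pvApply]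
  | cons t r ih =>
    intro k saved conv hinv
    have henum : pvEnumFrom k (t :: r) = (k, t) :: pvEnumFrom (k+1) r := rfl
    by_cases hB : t = "O" ∨ t = "mechanism"
    · have hstep : pvStepA (saved, conv) (k, t) = ([], conv) := by simp [pvStepA, hB]
      rw [henum, List.foldl_cons, hstep, ih (k+1) [] conv (by simp)]
      simp only [List.foldl_nil, ite_self]
      rw [show pvConvertB (t :: r) = (t :: (pvConvertB r).1, false) by
        simp [pvConvertB, if_pos hB]]
      simp only [if_neg (by simp : ¬ (false = true))]
      rw [show pvApply (t :: r) k conv = pvApply r (k+1) conv by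
        simp [pvApply, hB.elim (fun h => Or.inl h) (fun h => Or.inr (Or.inl h))]]
    · by_cases hS : t = "side_e"
      · subst hS
        have hstep : pvStepA (saved, conv) (k, "side_e")
            = ([], saved.foldl (fun c q => c.set q.1 "side_e") conv) := by
          simp [pvStepA]
        rw [henum, List.foldl_cons, hstep, ih (k+1) [] _ (by simp)]
        simp only [List.foldl_nil, ite_self]
        simp [pvApply, pvConvertB]
      · -- ordinary tag: abbr branch cannot fire because no saved tag is "side_e"
        have habbr : ¬ (t = "abbr" ∧ saved.getLast?.any (fun q => q.2 == "side_e") = true) := by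
          rintro ⟨-, hlast⟩
          cases hgl : saved.getLast? with
          | none => simp [hgl] at hlast
          | some q =>
            have hq : q ∈ saved := List.mem_of_getLast? hgl
            have := hinv q hq
            simp [hgl, Option.any] at hlast
            exact this hlast
        have hstep : pvStepA (saved, conv) (k, t) = (saved ++ [(k, t)], conv) := by
          simp only [pvStepA]
          rw [if_neg hB, if_neg hS, if_neg habbr]
        rw [henum, List.foldl_cons, hstep, ih (k+1) (saved ++ [(k, t)]) conv (by
          intro p hp
          rcases List.mem_append.1 hp with h | h
          · exact hinv p h
          · simp at h; simp [h, hS])]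
        by_cases hf : (pvConvertB r).2
        · simp [pvApply, pvConvertB, hB, hS, hf, List.foldl_append]
        · simp [pvApply, pvConvertB, hB, hS, hf]

lemma pvApply_eq_convertB (l : List String) : ∀ (k : Nat) (c : List String), c.drop k = l →
    pvApply l k c = c.take k ++ (pvConvertB l).1 := by
  induction l with
  | nil =>
    intro k c hd
    have : c.length ≤ k := by
      have := congrArg List.length hd
      simp at this
      omega
    simp [pvApply, pvConvertB, List.take_of_length_le this]
  | cons t r ih =>
    intro k c hd
    have hk : k < c.length := by
      by_contra h
      rw [List.drop_eq_nil_of_le (by omega)] at hd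
      simp at hd
    have hcd := List.getElem_cons_drop (as := c) (i := k) hk
    rw [hd, List.cons.injEq] at hcd
    have hget := hcd.1
    have hdrop := hcd.2
    have htake : c.take (k+1) = c.take k ++ [t] := by
      rw [List.take_add_one]
      simp [List.getElem?_eq_getElem hk, hget]
    by_cases hB : t = "O" ∨ t = "mechanism" ∨ t = "side_e"
    · rw [show pvApply (t :: r) k c = pvApply r (k+1) c by simp [pvApply, hB]]
      rw [ih (k+1) c hdrop, htake]
      have : (pvConvertB (t :: r)).1 = t :: (pvConvertB r).1 := by
        rcases hB with h | h | h <;> simp [pvConvertB, h]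
      rw [this]
      simp
    · push Not at hB
      obtain ⟨h1, h2, h3⟩ := hB
      by_cases hf : (pvConvertB r).2
      · rw [show pvApply (t :: r) k c = pvApply r (k+1) (c.set k "side_e") by
          simp [pvApply, h1, h2, h3, hf]]
        have hds : (c.set k "side_e").drop (k+1) = r := by
          rw [List.drop_set]
          simp [hdrop]
        rw [ih (k+1) _ hds]
        have hts : (c.set k "side_e").take (k+1) = c.take k ++ ["side_e"] := by
          rw [List.take_add_one]
          rw [List.take_set, List.set_eq_of_length_le (by simp)]
          simp [hk]
        rw [hts]
        have : (pvConvertB (t :: r)).1 = "side_e" :: (pvConvertB r).1 := by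
          simp [pvConvertB, h1, h2, h3, hf]
        rw [this]
        simp
      · rw [show pvApply (t :: r) k c = pvApply r (k+1) c by simp [pvApply, h1, h2, h3, hf]]
        rw [ih (k+1) c hdrop, htake]
        have : (pvConvertB (t :: r)).1 = t :: (pvConvertB r).1 := by
          simp [pvConvertB, h1, h2, h3, hf]
        rw [this]
        simp

lemma pvZip_dropLast (l : List String) : ∀ (x : Option String),
    l.zip (x :: l.map some) = l.zip (x :: l.dropLast.map some) := by
  induction l with
  | nil => intro x; rfl
  | cons a r ih =>
    intro x
    cases r with
    | nil => rfl
    | cons b r' =>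
      have h := ih (some a)
      simp only [List.zip_cons_cons, List.map_cons, List.dropLast_cons₂, List.cons.injEq,
        true_and] at h ⊢
      exact h

lemma pvFoldBio_eq_zip (conv : List String) : ∀ (prev : Option String) (acc : List String),
    (conv.foldl pvStepBio (acc, prev)).1 =
      acc ++ (conv.zip (prev :: conv.map some)).map (fun p =>
        if p.1 = "O" then "O" else if p.2 = some p.1 then "I-" ++ p.1 else "B-" ++ p.1) := by
  induction conv with
  | nil => intro prev acc; simp
  | cons lab rest ih =>
    intro prev acc
    by_cases hO : lab = "O"
    · subst hO
      simp only [List.foldl_cons, pvStepBio]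
      rw [ih]
      simp only [List.zip_cons_cons, List.map_cons]
      have hsame : (rest.zip ((none : Option String) :: rest.map some)).map (fun p =>
          if p.1 = "O" then "O" else if p.2 = some p.1 then "I-" ++ p.1 else "B-" ++ p.1)
          = (rest.zip (some "O" :: rest.map some)).map (fun p =>
          if p.1 = "O" then "O" else if p.2 = some p.1 then "I-" ++ p.1 else "B-" ++ p.1) := by
        cases rest with
        | nil => rfl
        | cons b r' =>
          simp only [List.zip_cons_cons, List.map_cons]
          by_cases hb : b = "O" <;> simp [hb, eq_comm]
      simp [hsame]
    · by_cases hp : prev = some lab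
      · subst hp
        simp only [List.foldl_cons, pvStepBio, if_neg hO]
        rw [if_neg (by simp)]
        rw [ih]
        simp [hO]
      · simp only [List.foldl_cons, pvStepBio, if_neg hO]
        rw [if_pos (show some lab ≠ prev from fun h => hp h.symm)]
        rw [ih]
        simp [hO, hp]

-- ===== VERDICT (by name: the statement is the Claim_ definition above) =====
theorem bio_tagging_spec : Claim_equal_bio_tagging := by
  intro sequence _
  show _ = _
  have hconv : ((pvEnumFrom 0 sequence).foldl pvStepA ([], sequence)).2 = (pvConvertB sequence).1 := by
    have h1 := pvFoldA_eq_apply sequence 0 [] sequence (by simp)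
    have h2 := pvApply_eq_convertB sequence 0 sequence (by simp)
    simpa [h2] using h1
  simp only [bio_tagging, bio_tagging_alt, hconv]
  rw [pvFoldBio_eq_zip, ← pvZip_dropLast]
  simp
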